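-- pv_equiv track=rewrite | github.com/lllcccfff/4d-gaussian-splatting | viewer/viewer.py | decimal_to_256
-- ===== SOURCE A (Python) =====
-- def decimal_to_256(decimal):
--     result = []
--     flag=3
--     while flag > 0:
--         flag -=1
--         remainder = decimal % 256
--         result.append(remainder)
--         decimal //= 256
--     return result[::-1]
-- ===== SOURCE B (Python) =====
-- def decimal_to_256(decimal):
--     return [(decimal // 65536) % 256, (decimal // 256) % 256, decimal % 256]
-- ===== Notes on version B (the rewrite author's own statement) =====
-- stated objective: simpler
-- what changed: Replaces the mutate-append-then-reverse loop with a closed-form list of the three big-endian bytes, each computed independently as (decimal // 256**k) % 256.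
import Mathlib
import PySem

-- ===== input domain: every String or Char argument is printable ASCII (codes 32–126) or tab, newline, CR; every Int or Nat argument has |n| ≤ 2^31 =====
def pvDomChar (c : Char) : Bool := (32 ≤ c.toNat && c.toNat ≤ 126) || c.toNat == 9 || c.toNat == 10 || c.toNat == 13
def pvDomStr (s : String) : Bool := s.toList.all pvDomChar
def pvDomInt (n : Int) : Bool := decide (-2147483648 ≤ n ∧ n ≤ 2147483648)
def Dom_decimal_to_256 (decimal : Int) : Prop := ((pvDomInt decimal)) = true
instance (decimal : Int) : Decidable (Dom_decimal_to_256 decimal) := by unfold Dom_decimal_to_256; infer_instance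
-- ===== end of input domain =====

-- B: closed-form big-endian three-byte extraction instead of A's append-then-reverse loop (simpler).


-- ===== PORT A =====
-- while flag > 0 loop: flag is the fuel, state = (decimal, result); result[::-1] via slice? (step -1, always some)
def pvA_loop : Nat -> Int -> List Int -> List Int
  | 0, _, result => result
  | flag + 1, decimal, result =>
      pvA_loop flag (PySem.Int.floordiv decimal 256) (result ++ [PySem.Int.mod decimal 256])

def decimal_to_256 (decimal : Int) : List Int :=
  (PySem.List.slice? (pvA_loop 3 decimal []) none none (-1)).getD []

-- ===== PORT B =====
def decimal_to_256_alt (decimal : Int) : List Int :=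
  [PySem.Int.mod (PySem.Int.floordiv decimal 65536) 256,
   PySem.Int.mod (PySem.Int.floordiv decimal 256) 256,
   PySem.Int.mod decimal 256]

-- ===== PRECONDITION & SPEC =====
def Spec_decimal_to_256 (decimal : Int) (out : List Int) : Prop := out = decimal_to_256_alt decimal
instance (decimal : Int) (out : List Int) : Decidable (Spec_decimal_to_256 decimal out) := by unfold Spec_decimal_to_256; infer_instance

-- ===== CLAIM (what is proved, stated in full; the proofs are below) =====
def Claim_equal_decimal_to_256 : Prop := ∀ (decimal : Int), Dom_decimal_to_256 decimal → Spec_decimal_to_256 decimal (decimal_to_256 decimal)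

-- ===== LEMMAS AND PROOFS =====

theorem ediv_ediv_256 (d : Int) : d / 256 / 256 % 256 = d / 65536 % 256 := by
  have h : d / 256 / 256 = d / (256 * 256) := Int.ediv_ediv_of_nonneg (by omega)
  rw [h]; norm_num

-- ===== VERDICT (by name: the statement is the Claim_ definition above) =====
theorem decimal_to_256_spec : Claim_equal_decimal_to_256 := by
  intro d _
  show _ = _
  simp [decimal_to_256, decimal_to_256_alt, pvA_loop,
        PySem.List.slice?_none_none_neg_one, ediv_ediv_256]
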